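-- pv_equiv track=rewrite | github.com/Bharath-970/kaggle-comp | src/analyze.py | _canonical_seq
-- ===== SOURCE A (Python) =====
-- def _canonical_seq(colors) -> tuple[int, ...]:
--     """Canonicalize a color sequence, ignoring actual color names."""
--     mapping = {}
--     nxt = 0
--     out = []
--     for c in colors:
--         c = int(c)
--         if c not in mapping:
--             mapping[c] = nxt
--             nxt += 1
--         out.append(mapping[c])
--     return tuple(out)
-- ===== SOURCE B (Python) =====
-- def _canonical_seq(colors) -> tuple[int, ...]:
--     """Canonicalize a color sequence, ignoring actual color names."""
--     xs = [int(c) for c in colors]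
--     # The canonical label of a value is the number of DISTINCT values that
--     # occur strictly before its first occurrence: no mapping dict, no counter.
--     return tuple(len(set(xs[:xs.index(c)])) for c in xs)
-- ===== Notes on version B (the rewrite author's own statement) =====
-- stated objective: alternative
-- what changed: A's fused dict-and-counter loop is replaced by a per-element closed-form characterisation: each element's label is computed independently as the number of distinct values in the prefix strictly before its first occurrence (len(set(xs[:xs.index(c)]))); B maintains no mapping and no running counter at all.
import Mathlib
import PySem

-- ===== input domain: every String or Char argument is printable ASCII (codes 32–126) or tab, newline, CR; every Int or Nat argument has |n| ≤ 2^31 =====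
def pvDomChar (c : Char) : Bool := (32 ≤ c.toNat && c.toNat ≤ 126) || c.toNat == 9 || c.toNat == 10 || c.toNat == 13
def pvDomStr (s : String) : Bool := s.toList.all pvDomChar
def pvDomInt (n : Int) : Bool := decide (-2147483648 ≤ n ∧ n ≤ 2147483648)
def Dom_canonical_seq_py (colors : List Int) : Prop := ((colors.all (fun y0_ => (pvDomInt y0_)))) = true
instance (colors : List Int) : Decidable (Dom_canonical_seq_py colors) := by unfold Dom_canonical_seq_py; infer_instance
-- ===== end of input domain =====

-- B drops A's mapping dict and counter: each label is computed independently as the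
-- number of distinct values strictly before the element's first occurrence (alternative, not faster).

-- ===== PORT A =====
-- A's loop body: if c not in mapping: mapping[c] = nxt; nxt += 1; out.append(mapping[c])
-- (mapping[c] after the conditional insert always finds the key, so `.getD 0` never takes its default)
def canonical_seq_py_step (st : PySem.Dict Int Int × Int × List Int) (c : Int) :
    PySem.Dict Int Int × Int × List Int :=
  let m := st.1
  let m' := if m.contains c then m else m.insert c st.2.1
  (m', if m.contains c then st.2.1 else st.2.1 + 1, st.2.2 ++ [(m'.get? c).getD 0])

def canonical_seq_py (colors : List Int) : List Int :=
  (colors.foldl canonical_seq_py_step (PySem.Dict.empty, 0, [])).2.2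

-- ===== PORT B =====
-- xs = [int(c) for c in colors]  (int(c) on an int is the identity);
-- tuple(len(set(xs[:xs.index(c)])) for c in xs) — xs.index(c) always succeeds since c ∈ xs,
-- so `.getD 0` never takes its default; xs[:k] is PySem.List.slice with a nonnegative bound.
def canonical_seq_py_alt (colors : List Int) : List Int :=
  let xs := colors.map (fun c => c)
  xs.map (fun c =>
    ((PySem.Set.ofList
        (PySem.List.slice xs none (some (((PySem.List.index? xs c).getD 0 : Nat) : Int)))).length : Int))

-- ===== PRECONDITION & SPEC =====
def Spec_canonical_seq_py (colors : List Int) (out : List Int) : Prop := out = canonical_seq_py_alt colors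
instance (colors : List Int) (out : List Int) : Decidable (Spec_canonical_seq_py colors out) := by unfold Spec_canonical_seq_py; infer_instance

-- ===== CLAIM (what is proved, stated in full; the proofs are below) =====
def Claim_equal_canonical_seq_py : Prop := ∀ (colors : List Int), Dom_canonical_seq_py colors → Spec_canonical_seq_py colors (canonical_seq_py colors)

-- ===== LEMMAS AND PROOFS =====

-- folding Set.add only ever appends to the set
theorem pv_foldl_add_prefix (rest : List Int) : ∀ (S : PySem.Set Int),
    ∃ t, rest.foldl PySem.Set.add S = S ++ t := by
  induction rest with
  | nil => exact fun S => ⟨[], by simp⟩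
  | cons c rest ih =>
    intro S
    by_cases hc : c ∈ S
    · obtain ⟨t, ht⟩ := ih S
      exact ⟨t, by simpa [PySem.Set.add, hc] using ht⟩
    · obtain ⟨t, ht⟩ := ih (S ++ [c])
      exact ⟨c :: t, by simpa [PySem.Set.add, hc] using ht⟩

-- an element already present keeps its index through any further adds
theorem pv_index?_stable (rest : List Int) (S : PySem.Set Int) (v : Int) (hv : v ∈ S) :
    PySem.List.index? (rest.foldl PySem.Set.add S) v = PySem.List.index? S v := by
  obtain ⟨t, ht⟩ := pv_foldl_add_prefix rest S
  rw [ht, PySem.List.index?_append_of_mem t hv]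

theorem pv_index?_append_ne (S : List Int) (c v : Int) (hne : v ≠ c) :
    PySem.List.index? (S ++ [c]) v = PySem.List.index? S v := by
  by_cases hv : v ∈ S
  · exact PySem.List.index?_append_of_mem [c] hv
  · rw [(PySem.List.index?_eq_none_iff (S ++ [c]) v).2 (by simp [hne, hv]),
      (PySem.List.index?_eq_none_iff S v).2 hv]

-- A's loop invariant: if the dict maps each value to its index in the seen-set S
-- (and the counter is |S|), the remaining loop appends the indices into the final seen-set
theorem pv_loop (rest : List Int) : ∀ (S : PySem.Set Int) (m : PySem.Dict Int Int) (out : List Int),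
    (∀ v, m.get? v = Option.map (fun k : Nat => (k : Int)) (PySem.List.index? S v)) →
    (rest.foldl canonical_seq_py_step (m, (S.length : Int), out)).2.2
      = out ++ rest.map (fun c =>
          (((PySem.List.index? (rest.foldl PySem.Set.add S) c).getD 0 : Nat) : Int)) := by
  induction rest with
  | nil => intro S m out _; simp
  | cons c rest ih =>
    intro S m out hm
    have hcont : m.contains c = decide (c ∈ S) := by
      rw [PySem.Dict.contains_eq_isSome_get?, hm c, Option.isSome_map]
      by_cases hc : c ∈ S
      · rw [(PySem.List.index?_isSome_iff S c).2 hc]; simp [hc]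
      · rw [(PySem.List.index?_eq_none_iff S c).2 hc]; simp [hc]
    by_cases hc : c ∈ S
    · have hstep : canonical_seq_py_step (m, (S.length : Int), out) c
          = (m, (S.length : Int), out ++ [(m.get? c).getD 0]) := by
        simp [canonical_seq_py_step, hcont, hc]
      have hadd : PySem.Set.add S c = S := by
        simp [PySem.Set.add, hc]
      have hval : (m.get? c).getD 0
          = (((PySem.List.index? (rest.foldl PySem.Set.add S) c).getD 0 : Nat) : Int) := by
        rw [pv_index?_stable rest S c hc, hm c]
        cases h : PySem.List.index? S c <;> simp
      simp only [List.foldl_cons, hstep, hadd, List.map_cons, hval]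
      rw [ih S m _ hm]
      simp
    · have hstep : canonical_seq_py_step (m, (S.length : Int), out) c
          = (m.insert c (S.length : Int), (S.length : Int) + 1,
             out ++ [((m.insert c (S.length : Int)).get? c).getD 0]) := by
        simp [canonical_seq_py_step, hcont, hc]
      have hadd : PySem.Set.add S c = S ++ [c] := by
        simp [PySem.Set.add, hc]
      have hm' : ∀ v, (m.insert c (S.length : Int)).get? v
          = Option.map (fun k : Nat => (k : Int)) (PySem.List.index? (S ++ [c]) v) := by
        intro v
        by_cases hv : v = c
        · subst hv
          rw [PySem.Dict.get?_insert_self m v ((S.length : Nat) : Int),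
            PySem.List.index?_append_singleton_self S v hc]
          simp
        · rw [PySem.Dict.get?_insert_of_ne m _ hv, hm v, pv_index?_append_ne S c v hv]
      have hval : ((m.insert c (S.length : Int)).get? c).getD 0
          = (((PySem.List.index? (rest.foldl PySem.Set.add (S ++ [c])) c).getD 0 : Nat) : Int) := by
        rw [pv_index?_stable rest (S ++ [c]) c (by simp),
            PySem.Dict.get?_insert_self m c ((S.length : Nat) : Int),
            PySem.List.index?_append_singleton_self S c hc]
        simp
      have hlen : ((S.length : Int) + 1) = ((S ++ [c]).length : Int) := by
        push_cast [List.length_append, List.length_singleton]; ring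
      simp only [List.foldl_cons, hstep, hadd, List.map_cons, hval, hlen]
      rw [ih (S ++ [c]) _ _ hm']
      simp

-- B's characterisation: an element's index in the accumulated seen-set equals the number of
-- distinct new values in the prefix of the input strictly before its first occurrence
theorem pv_index_count (xs : List Int) : ∀ (S : PySem.Set Int) (c : Int), c ∉ S → c ∈ xs →
    PySem.List.index? (xs.foldl PySem.Set.add S) c
      = some (((xs.take ((PySem.List.index? xs c).getD 0)).foldl PySem.Set.add S).length) := by
  induction xs with
  | nil => intro _ _ _ h; exact absurd h (List.not_mem_nil)
  | cons a t ih =>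
    intro S c hcS hc
    by_cases hca : c = a
    · subst hca
      have hadd : PySem.Set.add S c = S ++ [c] := by simp [PySem.Set.add, hcS]
      simp only [List.foldl_cons, hadd, PySem.List.index?_cons_self, Option.getD_some,
        List.take_zero, List.foldl_nil]
      rw [pv_index?_stable t (S ++ [c]) c (by simp),
        PySem.List.index?_append_singleton_self S c hcS]
    · have hct : c ∈ t := by
        rcases List.mem_cons.1 hc with h | h
        · exact absurd h hca
        · exact h
      obtain ⟨k, hk⟩ := Option.isSome_iff_exists.1 ((PySem.List.index?_isSome_iff t c).2 hct)
      have hcS' : c ∉ PySem.Set.add S a := by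
        intro h
        rcases (PySem.Set.mem_add S a c).1 h with h | h
        · exact hcS h
        · exact hca h
      have hidx : PySem.List.index? (a :: t) c = some (k + 1) := by
        rw [PySem.List.index?_cons_of_ne _ (fun h => hca h.symm), hk]; rfl
      simp only [List.foldl_cons, hidx, Option.getD_some, List.take_succ_cons]
      rw [ih (PySem.Set.add S a) c hcS' hct, hk]
      rfl

-- ===== VERDICT (by name: the statement is the Claim_ definition above) =====
theorem canonical_seq_py_spec : Claim_equal_canonical_seq_py := by
  intro colors _
  unfold Spec_canonical_seq_py canonical_seq_py canonical_seq_py_alt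
  have h := pv_loop colors [] PySem.Dict.empty []
    (by intro v; simp [PySem.Dict.get?_empty, PySem.List.index?_eq_idxOf?])
  simp only [List.length_nil, Nat.cast_zero, List.nil_append] at h
  rw [h]
  simp only [List.map_id_fun', id]
  refine List.map_congr_left (fun c hc => ?_)
  rw [PySem.List.slice_to_natCast]
  rw [pv_index_count colors [] c (by simp) hc, PySem.Set.ofList_eq_foldl]
  simp
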